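-- pv_equiv track=rewrite | github.com/nithinreddyy/pulsegen-webscraping | extractor/crawler.py | should_skip_url
-- ===== SOURCE A (Python) =====
-- def should_skip_url(url):
--     """Skip URLs that are likely not documentation content."""
--     skip_patterns = [
--         # File downloads
--         '.zip', '.tar.gz', '.tar.bz2', '.pdf', '.doc', '.docx',
--         # Archives and downloads
--         '/archives/', '/download/', '/downloads/', '/releases/',
--         # API endpoints
--         '/api/', '/json', '/xml', '/rss',
--         # Media files
--         '.jpg', '.jpeg', '.png', '.gif', '.svg', '.mp4', '.mp3',
--         # Other non-content
--         '/search', '/login', '/register', '/logout', '/admin'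
--     ]
--
--     url_lower = url.lower()
--     return any(pattern in url_lower for pattern in skip_patterns)
-- ===== SOURCE B (Python) =====
-- # First-character dispatch: every skip pattern starts with '.' or '/', so walk the
-- # URL once and, only at those trigger characters, test the bucketed pattern tails.
-- _BUCKETS = {
--     '.': ('zip', 'tar.gz', 'tar.bz2', 'pdf', 'doc', 'docx',
--           'jpg', 'jpeg', 'png', 'gif', 'svg', 'mp4', 'mp3'),
--     '/': ('archives/', 'download/', 'downloads/', 'releases/',
--           'api/', 'json', 'xml', 'rss',
--           'search', 'login', 'register', 'logout', 'admin'),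
-- }
-- _EMPTY = ()
--
--
-- def should_skip_url(url):
--     """Skip URLs that are likely not documentation content."""
--     s = url.lower()
--     for i, c in enumerate(s):
--         if s.startswith(_BUCKETS.get(c, _EMPTY), i + 1):
--             return True
--     return False
-- ===== Notes on version B (the rewrite author's own statement) =====
-- stated objective: alternative
-- what changed: Replaced the per-pattern substring-containment scans with a single left-to-right scan that dispatches on the current character ('.' or '/') into a bucket of pattern tails, testing patterns only at positions where one could start.
import Mathlib
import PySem

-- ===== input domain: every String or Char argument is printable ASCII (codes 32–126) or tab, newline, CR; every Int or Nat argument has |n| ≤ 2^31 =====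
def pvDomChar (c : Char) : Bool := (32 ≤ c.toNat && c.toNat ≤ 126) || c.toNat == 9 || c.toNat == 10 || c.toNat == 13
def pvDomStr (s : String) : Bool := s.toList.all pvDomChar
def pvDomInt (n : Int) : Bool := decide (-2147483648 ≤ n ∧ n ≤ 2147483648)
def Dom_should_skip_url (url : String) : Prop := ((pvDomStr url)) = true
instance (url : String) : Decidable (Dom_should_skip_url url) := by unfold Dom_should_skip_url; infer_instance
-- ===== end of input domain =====

-- B replaces A's per-pattern substring scans with one left-to-right scan that
-- dispatches on the current character ('.' or '/') into a bucket of pattern tails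
-- (objective: alternative decomposition, same results).

-- ===== PORT A =====
def skipPatterns : List String :=
  [".zip", ".tar.gz", ".tar.bz2", ".pdf", ".doc", ".docx",
   "/archives/", "/download/", "/downloads/", "/releases/",
   "/api/", "/json", "/xml", "/rss",
   ".jpg", ".jpeg", ".png", ".gif", ".svg", ".mp4", ".mp3",
   "/search", "/login", "/register", "/logout", "/admin"]

def should_skip_url (url : String) : Bool :=
  let url_lower := PySem.Str.lower url
  skipPatterns.any (fun pattern => PySem.Str.isIn pattern url_lower)

-- ===== PORT B =====
-- Source B's _BUCKETS: pattern tails reachable after a '.' and after a '/'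
def dotTails : List (List Char) :=
  ["zip".toList, "tar.gz".toList, "tar.bz2".toList, "pdf".toList, "doc".toList,
   "docx".toList, "jpg".toList, "jpeg".toList, "png".toList, "gif".toList,
   "svg".toList, "mp4".toList, "mp3".toList]

def slashTails : List (List Char) :=
  ["archives/".toList, "download/".toList, "downloads/".toList, "releases/".toList,
   "api/".toList, "json".toList, "xml".toList, "rss".toList,
   "search".toList, "login".toList, "register".toList, "logout".toList, "admin".toList]

-- _BUCKETS.get(c, ()) — the empty bucket for any other character
def bucketTails (c : Char) : List (List Char) :=
  if c = '.' then dotTails else if c = '/' then slashTails else []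

-- the enumerate loop: at position i with suffix c :: rest, test
-- s.startswith(_BUCKETS.get(c, ()), i+1), i.e. the bucket tails against rest
def scanSkip : List Char → Bool
  | [] => false
  | c :: rest =>
      if (bucketTails c).any (fun t => PySem.Chars.startswith rest t) then true
      else scanSkip rest

def should_skip_url_alt (url : String) : Bool :=
  scanSkip (PySem.Chars.lower url.toList)

-- ===== PRECONDITION & SPEC =====
def Spec_should_skip_url (url : String) (out : Bool) : Prop := out = should_skip_url_alt url
instance (url : String) (out : Bool) : Decidable (Spec_should_skip_url url out) := by unfold Spec_should_skip_url; infer_instance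

-- ===== CLAIM (what is proved, stated in full; the proofs are below) =====
def Claim_equal_should_skip_url : Prop := ∀ (url : String), Dom_should_skip_url url → Spec_should_skip_url url (should_skip_url url)

-- ===== LEMMAS AND PROOFS =====

-- every pattern in the fixed list is nonempty
lemma skipPatterns_ne_nil : ∀ p ∈ skipPatterns, p.toList ≠ [] := by decide

-- the bucket dispatch at the head of the suffix tests exactly "some full pattern
-- is a prefix of c :: rest"
lemma bucket_step (c : Char) (rest : List Char) :
    ((bucketTails c).any (fun t => PySem.Chars.startswith rest t) = true)
      ↔ ∃ p ∈ skipPatterns, p.toList <+: c :: rest := by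
  by_cases hdot : c = '.'
  · subst hdot
    simp [bucketTails, dotTails, skipPatterns,
      PySem.Chars.startswith_iff, List.cons_prefix_cons]
  · by_cases hsl : c = '/'
    · subst hsl
      simp [bucketTails, slashTails, skipPatterns,
        PySem.Chars.startswith_iff, List.cons_prefix_cons]
    · have hd : ('.' = c) = False := by simp [Ne.symm hdot]
      have hs : ('/' = c) = False := by simp [Ne.symm hsl]
      simp [bucketTails, hdot, hsl, skipPatterns, List.cons_prefix_cons, hd, hs]

-- B's scan finds exactly the suffix positions where some pattern is a prefix,
-- i.e. whether some pattern is an infix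
lemma scanSkip_iff_infix (s : List Char) :
    scanSkip s = true ↔ ∃ p ∈ skipPatterns, p.toList <:+: s := by
  induction s with
  | nil =>
      simp only [scanSkip, Bool.false_eq_true, false_iff, not_exists]
      rintro p ⟨hp, hinf⟩
      exact skipPatterns_ne_nil p hp (List.eq_nil_of_infix_nil hinf)
  | cons c rest ih =>
      rw [scanSkip]
      split_ifs with h
      · simp only [true_iff]
        obtain ⟨p, hp, hpre⟩ := (bucket_step c rest).mp h
        exact ⟨p, hp, hpre.isInfix⟩
      · rw [ih]
        constructor
        · rintro ⟨p, hp, hinf⟩; exact ⟨p, hp, List.infix_cons hinf⟩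
        · rintro ⟨p, hp, hinf⟩
          rcases (List.infix_cons_iff).mp hinf with hpre | htail
          · exact absurd ((bucket_step c rest).mpr ⟨p, hp, hpre⟩) h
          · exact ⟨p, hp, htail⟩

-- ===== VERDICT (by name: the statement is the Claim_ definition above) =====
theorem should_skip_url_spec : Claim_equal_should_skip_url := by
  intro url _
  unfold Spec_should_skip_url should_skip_url should_skip_url_alt
  rw [Bool.eq_iff_iff, scanSkip_iff_infix]
  simp [List.any_eq_true, PySem.Str.toList_lower, PySem.Str.isIn,
    PySem.Chars.isIn_iff_infix]
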